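-- pv_equiv track=rewrite | github.com/common-workflow-language/cwltool | cwltool/provenance.py | _check_mod_11_2
-- ===== SOURCE A (Python) =====
-- def _check_mod_11_2(numeric_string):
--     # type: (Text) -> bool
--     """
--     Validate numeric_string for its MOD-11-2 checksum.
--
--     Any "-" in the numeric_string are ignored.
--
--     The last digit of numeric_string is assumed to be the checksum, 0-9 or X.
--
--     See ISO/IEC 7064:2003 and
--     https://support.orcid.org/knowledgebase/articles/116780-structure-of-the-orcid-identifier
--     """
--     # Strip -
--     nums = numeric_string.replace("-", "")
--     total = 0
--     # skip last (check)digit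
--     for num in nums[:-1]:
--         digit = int(num)
--         total = (total+digit)*2
--     remainder = total % 11
--     result = (12-remainder) % 11
--     if result == 10:
--         checkdigit = "X"
--     else:
--         checkdigit = str(result)
--     # Compare against last digit or X
--     return nums[-1].upper() == checkdigit
-- ===== SOURCE B (Python) =====
-- def _check_mod_11_2(numeric_string):
--     # type: (Text) -> bool
--     """MOD-11-2 check: running weighted sum reduced mod 11 over the reversed digits,
--     then a numeric comparison of the check digit instead of a string comparison."""
--     nums = numeric_string.replace("-", "")
--     digits = list(nums)
--     last = digits.pop()
--     total = 0
--     weight = 2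
--     for c in reversed(digits):
--         total = (total + int(c) * weight) % 11
--         weight = weight * 2 % 11
--     if last in ("x", "X"):
--         actual = 10
--     elif last.isdigit():
--         actual = int(last)
--     else:
--         return False
--     return actual == (12 - total) % 11
-- ===== Notes on version B (the rewrite author's own statement) =====
-- stated objective: alternative
-- what changed: Replaces A's Horner accumulation (total+digit)*2 followed by a string comparison against the rendered check digit by a running weighted sum over the reversed digits kept reduced mod 11 (weight doubling mod 11 each step) and a numeric comparison: the last char is mapped to its value (10 for x/X, its digit value, or an early False) and compared to (12 - total) % 11 as integers.
-- outside the precondition, e.g. on _check_mod_11_2('-'): A raises IndexError, B raises IndexError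
import Mathlib
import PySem

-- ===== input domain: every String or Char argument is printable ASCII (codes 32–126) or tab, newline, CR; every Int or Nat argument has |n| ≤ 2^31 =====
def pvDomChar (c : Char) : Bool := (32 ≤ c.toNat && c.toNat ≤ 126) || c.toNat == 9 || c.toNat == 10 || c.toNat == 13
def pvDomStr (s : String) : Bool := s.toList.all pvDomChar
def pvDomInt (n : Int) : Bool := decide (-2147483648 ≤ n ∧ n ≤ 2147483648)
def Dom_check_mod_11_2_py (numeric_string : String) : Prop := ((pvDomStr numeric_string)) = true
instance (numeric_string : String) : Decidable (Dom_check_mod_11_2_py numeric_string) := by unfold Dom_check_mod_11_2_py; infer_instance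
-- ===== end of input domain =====

-- B replaces A's Horner accumulation + string check-digit comparison by a running mod-11 weighted sum
-- over the reversed digits and a numeric check-digit comparison (objective: alternative, same cost).


-- ===== PORT A =====
-- loop body of A: total = (total + int(num)) * 2 ; int(num) = none is Python's ValueError
def pvStepA (acc : Option Int) (c : Char) : Option Int :=
  acc.bind fun total => (PySem.Int.ofChars? [c]).map fun digit => (total + digit) * 2

def check_mod_11_2_py (numeric_string : String) : Bool :=
  let nums := PySem.Chars.replace numeric_string.toList ['-'] []
  let total? := (PySem.Chars.slice nums none (some (-1))).foldl pvStepA (some 0)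
  match total?, PySem.List.pyGet? nums (-1) with
  | some total, some last =>
      let remainder := PySem.Int.mod total 11
      let result := PySem.Int.mod (12 - remainder) 11
      let checkdigit := if result = 10 then ['X'] else PySem.Int.toChars result
      [PySem.Chars.upperChar last] == checkdigit
  | _, _ => false   -- unreachable under Pre_: int(num) ValueError / nums[-1] IndexError

-- ===== PORT B =====
-- loop body of B: total = (total + int(c) * weight) % 11 ; weight = weight * 2 % 11
def pvStepB (acc : Option (Int × Int)) (c : Char) : Option (Int × Int) :=
  acc.bind fun tw => (PySem.Int.ofChars? [c]).map fun d =>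
    (PySem.Int.mod (tw.1 + d * tw.2) 11, PySem.Int.mod (tw.2 * 2) 11)

def check_mod_11_2_py_alt (numeric_string : String) : Bool :=
  let nums := PySem.Chars.replace numeric_string.toList ['-'] []
  match PySem.List.pop? nums with                       -- last = digits.pop()
  | none => false   -- unreachable under Pre_: digits.pop() IndexError on the empty list
  | some (last, body) =>
      match body.reverse.foldl pvStepB (some (0, 2)) with   -- for c in reversed(digits)
      | none => false   -- unreachable under Pre_: int(c) ValueError
      | some tw =>
          let actual? : Option Int :=
            if last = 'x' ∨ last = 'X' then some 10
            else if PySem.Chars.isdigit last then PySem.Int.ofChars? [last]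
            else none
          match actual? with
          | none => false                               -- the bare 'return False' branch
          | some actual => actual == PySem.Int.mod (12 - tw.1) 11

-- ===== PRECONDITION & SPEC =====
-- Pre_ excludes exactly the inputs on which Python A raises: after stripping '-' the string must be
-- non-empty (else nums[-1] is IndexError) and all but its last char must be decimal digits (else
-- int(num) is ValueError).  B raises the same exceptions there.
def Pre_check_mod_11_2_py (numeric_string : String) : Prop :=
  let nums := PySem.Chars.replace numeric_string.toList ['-'] []
  nums ≠ [] ∧ nums.dropLast.all PySem.Chars.isdigit = true
instance (numeric_string : String) : Decidable (Pre_check_mod_11_2_py numeric_string) := by unfold Pre_check_mod_11_2_py; infer_instance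

def pvWitness_check_mod_11_2_py : String := "0000-0002-1825-0097"

def Spec_check_mod_11_2_py (numeric_string : String) (out : Bool) : Prop := out = check_mod_11_2_py_alt numeric_string
instance (numeric_string : String) (out : Bool) : Decidable (Spec_check_mod_11_2_py numeric_string out) := by unfold Spec_check_mod_11_2_py; infer_instance

-- ===== CLAIM (what is proved, stated in full; the proofs are below) =====
def Claim_equal_check_mod_11_2_py : Prop := ∀ (numeric_string : String), Dom_check_mod_11_2_py numeric_string → Pre_check_mod_11_2_py numeric_string → Spec_check_mod_11_2_py numeric_string (check_mod_11_2_py numeric_string)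

-- ===== LEMMAS AND PROOFS =====
lemma pvCharEq (c d : Char) (h : c.toNat = d.toNat) : c = d := by
  apply Char.ext; unfold Char.toNat at h; exact UInt32.toNat_inj.mp h

lemma pvToNatOfNat (n : Nat) (h : n < 55296) : (Char.ofNat n).toNat = n := by
  unfold Char.ofNat
  rw [dif_pos (Or.inl h)]
  unfold Char.ofNatAux Char.toNat
  simp

lemma pvIsdigitIff (c : Char) : PySem.Chars.isdigit c = true ↔ 48 ≤ c.toNat ∧ c.toNat ≤ 57 := by
  simp [PySem.Chars.isdigit, UInt32.le_iff_toNat_le, Char.le_def]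

lemma pvIslowerIff (c : Char) : PySem.Chars.islower c = true ↔ 97 ≤ c.toNat ∧ c.toNat ≤ 122 := by
  simp [PySem.Chars.islower, UInt32.le_iff_toNat_le, Char.le_def]

lemma pvUpperToNat (c : Char) :
    (PySem.Chars.upperChar c).toNat
      = if 97 ≤ c.toNat ∧ c.toNat ≤ 122 then c.toNat - 32 else c.toNat := by
  unfold PySem.Chars.upperChar
  by_cases h : 97 ≤ c.toNat ∧ c.toNat ≤ 122
  · rw [if_pos h, if_pos ((pvIslowerIff c).mpr h), pvToNatOfNat _ (by omega)]
  · rw [if_neg h, if_neg (by simpa [pvIslowerIff] using h)]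

-- digits.pop() is 'last element paired with dropLast' (none on the empty list)
lemma pvPop {α : Type} (xs : List α) :
    PySem.List.pop? xs = (PySem.List.pyGet? xs (-1)).map (fun x => (x, xs.dropLast)) := by
  unfold PySem.List.pop? PySem.List.pyGet? PySem.List.pyIdx?
  cases xs with
  | nil => rfl
  | cons y ys =>
    simp only [List.length_cons]
    norm_num
    have h := List.eraseIdx_length_sub_one (l := y :: ys)
    simp at h
    cases (y :: ys)[ys.length + 1 - 1]? <;> simp [h]

lemma pvAfold_none (l : List Char) : l.foldl pvStepA none = none := by
  induction l with
  | nil => rfl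
  | cons c l ih => simpa [pvStepA] using ih

lemma pvAfold_shift (l : List Char) (t : Int) :
    l.foldl pvStepA (some t) = (l.foldl pvStepA (some 0)).map (fun T => T + t * 2 ^ l.length) := by
  induction l generalizing t with
  | nil => simp
  | cons c l ih =>
      cases hp : PySem.Int.ofChars? [c] with
      | none => simp [List.foldl_cons, pvStepA, hp, pvAfold_none]
      | some d =>
          simp only [List.foldl_cons, pvStepA, hp, Option.bind_some, Option.map_some]
          rw [ih ((t + d) * 2), ih ((0 + d) * 2)]
          cases l.foldl pvStepA (some 0) with
          | none => rfl
          | some T => simp [List.length_cons, pow_succ]; ring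

-- A's Horner loop over l and B's running mod-11 weighted-sum loop over l.reverse agree:
-- B's state is (A's total mod 11, next weight 2^(|l|+1) mod 11).
lemma pvMain (l : List Char) :
    l.reverse.foldl pvStepB (some (0, 2))
      = (l.foldl pvStepA (some 0)).map
          (fun T => (PySem.Int.mod T 11, PySem.Int.mod ((2:Int) ^ (l.length + 1)) 11)) := by
  induction l with
  | nil => rfl
  | cons c l ih =>
      rw [List.reverse_cons, List.foldl_append, ih]
      cases hp : PySem.Int.ofChars? [c] with
      | none =>
          have hA : (c :: l).foldl pvStepA (some 0) = none := by
            simp [List.foldl_cons, pvStepA, hp, pvAfold_none]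
          rw [hA]
          cases l.foldl pvStepA (some 0) <;> simp [pvStepB, hp]
      | some d =>
          have hA : (c :: l).foldl pvStepA (some 0)
              = (l.foldl pvStepA (some 0)).map (fun T => T + d * 2 ^ (l.length + 1)) := by
            simp only [List.foldl_cons, pvStepA, hp, Option.bind_some, Option.map_some]
            rw [pvAfold_shift l ((0 + d) * 2)]
            cases l.foldl pvStepA (some 0) with
            | none => rfl
            | some T => simp [pow_succ]; ring
          rw [hA]
          cases l.foldl pvStepA (some 0) with
          | none => simp [pvStepB, hp]
          | some T =>
              simp only [Option.map_some, List.foldl_cons, List.foldl_nil, pvStepB,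
                Option.bind_some, hp]
              have hm : ∀ a : Int, PySem.Int.mod a 11 = a % 11 :=
                fun a => PySem.Int.mod_eq_emod_of_pos (a := a) (by norm_num)
              simp only [hm, List.length_cons]
              refine congrArg some (Prod.ext ?_ ?_)
              · simp [Int.add_emod, Int.mul_emod]
              · show 2 ^ (l.length + 1) % 11 * 2 % 11 = 2 ^ (l.length + 1 + 1) % 11
                rw [pow_succ (2:Int) (l.length + 1)]
                simp [Int.mul_emod]

-- A's string comparison of the check digit equals B's numeric comparison, for any last char
-- and any result value r = (12 - total % 11) % 11 ∈ [0, 11).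
lemma pvCompare (c : Char) (r : Int) (h0 : 0 ≤ r) (h1 : r < 11) :
    ([PySem.Chars.upperChar c] == (if r = 10 then ['X'] else PySem.Int.toChars r))
      = (match (if c = 'x' ∨ c = 'X' then some (10:Int)
                else if PySem.Chars.isdigit c then PySem.Int.ofChars? [c] else none) with
         | none => false
         | some a => a == r) := by
  by_cases hx : c = 'x' ∨ c = 'X'
  · rcases hx with h | h <;> subst h
    · interval_cases r <;> decide
    · interval_cases r <;> decide
  · by_cases hd : PySem.Chars.isdigit c = true
    · have hrange := (pvIsdigitIff c).mp hd
      have h10 : c.toNat = 48 ∨ c.toNat = 49 ∨ c.toNat = 50 ∨ c.toNat = 51 ∨ c.toNat = 52 ∨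
          c.toNat = 53 ∨ c.toNat = 54 ∨ c.toNat = 55 ∨ c.toNat = 56 ∨ c.toNat = 57 := by omega
      rcases h10 with h|h|h|h|h|h|h|h|h|h <;>
        · first
          | (rw [show c = '0' from pvCharEq c '0' (by rw [h]; decide)]; interval_cases r <;> decide)
          | (rw [show c = '1' from pvCharEq c '1' (by rw [h]; decide)]; interval_cases r <;> decide)
          | (rw [show c = '2' from pvCharEq c '2' (by rw [h]; decide)]; interval_cases r <;> decide)
          | (rw [show c = '3' from pvCharEq c '3' (by rw [h]; decide)]; interval_cases r <;> decide)
          | (rw [show c = '4' from pvCharEq c '4' (by rw [h]; decide)]; interval_cases r <;> decide)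
          | (rw [show c = '5' from pvCharEq c '5' (by rw [h]; decide)]; interval_cases r <;> decide)
          | (rw [show c = '6' from pvCharEq c '6' (by rw [h]; decide)]; interval_cases r <;> decide)
          | (rw [show c = '7' from pvCharEq c '7' (by rw [h]; decide)]; interval_cases r <;> decide)
          | (rw [show c = '8' from pvCharEq c '8' (by rw [h]; decide)]; interval_cases r <;> decide)
          | (rw [show c = '9' from pvCharEq c '9' (by rw [h]; decide)]; interval_cases r <;> decide)
    · rw [if_neg hx, if_neg hd]
      have h2 : ¬(48 ≤ c.toNat ∧ c.toNat ≤ 57) := by simpa [pvIsdigitIff] using hd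
      have h3 : c.toNat ≠ 120 := fun h => hx (Or.inl (pvCharEq c 'x' (by rw [h]; rfl)))
      have h4 : c.toNat ≠ 88 := fun h => hx (Or.inr (pvCharEq c 'X' (by rw [h]; rfl)))
      have hne : ∀ (d : Char), (d.toNat = 88 ∨ (48 ≤ d.toNat ∧ d.toNat ≤ 57)) →
          PySem.Chars.upperChar c ≠ d := by
        intro d hd' heq
        have h5 : (PySem.Chars.upperChar c).toNat = d.toNat := by rw [heq]
        rw [pvUpperToNat] at h5
        split_ifs at h5 <;> omega
      interval_cases r <;>
        simp [hne 'X' (by decide), hne '0' (by decide), hne '1' (by decide), hne '2' (by decide), hne '3' (by decide), hne '4' (by decide), hne '5' (by decide), hne '6' (by decide), hne '7' (by decide), hne '8' (by decide), hne '9' (by decide),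
          show PySem.Int.toChars 0 = ['0'] from rfl, show PySem.Int.toChars 1 = ['1'] from rfl, show PySem.Int.toChars 2 = ['2'] from rfl, show PySem.Int.toChars 3 = ['3'] from rfl, show PySem.Int.toChars 4 = ['4'] from rfl, show PySem.Int.toChars 5 = ['5'] from rfl, show PySem.Int.toChars 6 = ['6'] from rfl, show PySem.Int.toChars 7 = ['7'] from rfl, show PySem.Int.toChars 8 = ['8'] from rfl, show PySem.Int.toChars 9 = ['9'] from rfl]

-- ===== VERDICT (by name: the statement is the Claim_ definition above) =====
theorem check_mod_11_2_py_spec : Claim_equal_check_mod_11_2_py := by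
  intro s _ _
  unfold Spec_check_mod_11_2_py check_mod_11_2_py check_mod_11_2_py_alt
  simp only [PySem.Chars.slice_eq_listSlice, PySem.List.slice_to_neg_one, pvPop]
  cases hg : PySem.List.pyGet? (PySem.Chars.replace s.toList ['-'] []) (-1) with
  | none =>
      cases (PySem.Chars.replace s.toList ['-'] []).dropLast.foldl pvStepA (some 0) <;> rfl
  | some last =>
      simp only [Option.map_some]
      rw [pvMain]
      cases hT : (PySem.Chars.replace s.toList ['-'] []).dropLast.foldl pvStepA (some 0) with
      | none => rfl
      | some T =>
          simp only [Option.map_some]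
          exact pvCompare last (PySem.Int.mod (12 - PySem.Int.mod T 11) 11)
            (PySem.Int.mod_nonneg _ (by norm_num)) (PySem.Int.mod_lt _ (by norm_num))
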